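-- pv_equiv track=rewrite | github.com/khuushichand/aiml-project | tldw_Server_API/app/core/RAG/rag_service/rewrite_cache.py | _is_safe_user_id
-- ===== SOURCE A (Python) =====
-- import string
--
-- _ALLOWED_USER_ID_CHARS = set(string.ascii_letters + string.digits + "_-")
--
-- _MAX_USER_ID_LEN = 128
--
-- def _is_safe_user_id(user_id: str) -> bool:
--     """Validate a user_id path segment (str -> bool).
--     Rejects empty/relative components and non-allowed chars for safety."""
--     if not user_id or user_id in {".", ".."}:
--         return False
--     if len(user_id) > _MAX_USER_ID_LEN:
--         return False
--     if user_id[0] not in string.ascii_letters + string.digits: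
--         return False
--     if user_id[-1] not in string.ascii_letters + string.digits:
--         return False
--     return all(ch in _ALLOWED_USER_ID_CHARS for ch in user_id)
-- ===== SOURCE B (Python) =====
-- import re
--
-- _MAX_USER_ID_LEN = 128
--
-- _USER_ID_RE = re.compile(r'[A-Za-z0-9](?:[A-Za-z0-9_-]*[A-Za-z0-9])?')
--
-- def _is_safe_user_id(user_id: str) -> bool:
--     """Validate a user_id path segment (str -> bool)."""
--     if len(user_id) > _MAX_USER_ID_LEN:
--         return False
--     return _USER_ID_RE.fullmatch(user_id) is not None
-- ===== Notes on version B (the rewrite author's own statement) =====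
-- stated objective: idiomatic
-- what changed: Replaces the empty/dot-segment guard plus separate first-char, last-char and all(...) membership scans with one anchored regex fullmatch that enforces alphanumeric ends and allowed interior characters in one pass (only the length check stays explicit).
import Mathlib
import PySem

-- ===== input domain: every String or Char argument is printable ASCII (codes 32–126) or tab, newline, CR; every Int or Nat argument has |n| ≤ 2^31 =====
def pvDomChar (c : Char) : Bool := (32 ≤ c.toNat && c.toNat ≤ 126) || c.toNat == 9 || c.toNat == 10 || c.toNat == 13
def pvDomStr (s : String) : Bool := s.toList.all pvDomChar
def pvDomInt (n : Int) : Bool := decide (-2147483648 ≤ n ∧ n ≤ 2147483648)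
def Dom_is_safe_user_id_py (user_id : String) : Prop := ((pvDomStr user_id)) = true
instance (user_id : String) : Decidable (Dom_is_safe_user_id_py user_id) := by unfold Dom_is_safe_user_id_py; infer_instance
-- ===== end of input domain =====

-- B replaces A's empty/dot-segment guard and the three separate membership scans (first char,
-- last char, all(...)) by a single anchored regex fullmatch; same behaviour, more idiomatic.

-- shared constants (string.ascii_letters + string.digits and _ALLOWED_USER_ID_CHARS)
def pvAlnumChars : List Char :=
  "abcdefghijklmnopqrstuvwxyzABCDEFGHIJKLMNOPQRSTUVWXYZ0123456789".toList
def pvAllowedChars : List Char := pvAlnumChars ++ "_-".toList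
def pvAlnum (c : Char) : Bool := pvAlnumChars.contains c
def pvAllowed (c : Char) : Bool := pvAllowedChars.contains c

-- ===== PORT A =====
-- literal transliteration of A: guard against empty and dot segments, length check, first-char check,
-- last-char check (via pyGet? at 0 and -1), then the all(...) scan.
def is_safe_user_id_py (user_id : String) : Bool :=
  let cs := user_id.toList
  if cs = [] || cs = ['.'] || cs = ['.', '.'] then false
  else if PySem.List.len cs > 128 then false
  else
    match PySem.List.pyGet? cs 0 with
    | none => false
    | some c0 =>
      if !pvAlnum c0 then false
      else
        match PySem.List.pyGet? cs (-1) with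
        | none => false
        | some cl =>
          if !pvAlnum cl then false
          else cs.all pvAllowed

-- ===== PORT B =====
-- hand-written matcher for the anchored regex [A-Za-z0-9](?:[A-Za-z0-9_-]*[A-Za-z0-9])?
-- (exact: for this pattern, fullmatch of the group means allowed chars then a final alnum char)
def pvReGrp : List Char → Bool
  | [] => false
  | c :: rest => if rest = [] then pvAlnum c else pvAllowed c && pvReGrp rest

def pvReFull : List Char → Bool
  | [] => false
  | c :: rest => pvAlnum c && (rest.isEmpty || pvReGrp rest)

def is_safe_user_id_py_alt (user_id : String) : Bool :=
  if PySem.List.len user_id.toList > 128 then false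
  else pvReFull user_id.toList

-- ===== PRECONDITION & SPEC =====
def Spec_is_safe_user_id_py (user_id : String) (out : Bool) : Prop := out = is_safe_user_id_py_alt user_id
instance (user_id : String) (out : Bool) : Decidable (Spec_is_safe_user_id_py user_id out) := by unfold Spec_is_safe_user_id_py; infer_instance

-- ===== CLAIM (what is proved, stated in full; the proofs are below) =====
def Claim_equal_is_safe_user_id_py : Prop := ∀ (user_id : String), Dom_is_safe_user_id_py user_id → Spec_is_safe_user_id_py user_id (is_safe_user_id_py user_id)

-- ===== LEMMAS AND PROOFS =====

theorem pvAllowed_of_pvAlnum (c : Char) (h : pvAlnum c = true) : pvAllowed c = true := by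
  simp only [pvAlnum, List.contains_eq_mem, decide_eq_true_eq] at h
  simp only [pvAllowed, pvAllowedChars, List.contains_eq_mem, List.mem_append, decide_eq_true_eq]
  exact Or.inl h

-- the group regex matches exactly: every char but the last allowed, last char alphanumeric
theorem pvReGrp_append (cs : List Char) (c : Char) :
    pvReGrp (cs ++ [c]) = (cs.all pvAllowed && pvAlnum c) := by
  induction cs with
  | nil => simp [pvReGrp]
  | cons d cs ih =>
    simp only [List.cons_append, pvReGrp, List.append_eq_nil_iff, List.all_cons]
    simp [ih, Bool.and_assoc]

theorem pvReFull_char (c : Char) (rest : List Char) :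
    pvReFull (c :: rest) =
      (pvAlnum c && pvAlnum ((c :: rest).getLast (by simp)) && (c :: rest).all pvAllowed) := by
  cases hr : rest with
  | nil =>
    simp only [pvReFull, List.isEmpty_nil, Bool.true_or, Bool.and_true, List.getLast_singleton,
      List.all_cons, List.all_nil, Bool.and_true]
    cases h : pvAlnum c with
    | false => simp
    | true => simp [pvAllowed_of_pvAlnum c h]
  | cons r rs =>
    have hne : r :: rs ≠ ([] : List Char) := by simp
    have hlast : (c :: r :: rs).getLast (by simp) = (r :: rs).getLast hne := by
      simp [List.getLast_cons]
    have hallsplit : (r :: rs).all pvAllowed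
        = ((r :: rs).dropLast.all pvAllowed && pvAllowed ((r :: rs).getLast hne)) := by
      conv_lhs => rw [← List.dropLast_append_getLast hne]
      simp [List.all_append]
    have hgrp : pvReGrp (r :: rs)
        = ((r :: rs).dropLast.all pvAllowed && pvAlnum ((r :: rs).getLast hne)) := by
      conv_lhs => rw [← List.dropLast_append_getLast hne]
      rw [pvReGrp_append]
    simp only [pvReFull, List.isEmpty_cons, Bool.false_or, hgrp, hlast, List.all_cons, hallsplit]
    cases hc : pvAlnum c with
    | false => simp
    | true =>
      cases hl : pvAlnum ((r :: rs).getLast hne) with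
      | false => simp
      | true =>
        simp [pvAllowed_of_pvAlnum c hc, pvAllowed_of_pvAlnum _ hl]

theorem pv_dot_not_alnum : pvAlnum '.' = false := by decide

-- ===== VERDICT (by name: the statement is the Claim_ definition above) =====
theorem is_safe_user_id_py_spec : Claim_equal_is_safe_user_id_py := by
  intro user_id _
  unfold Spec_is_safe_user_id_py is_safe_user_id_py is_safe_user_id_py_alt
  cases hcs : user_id.toList with
  | nil => simp [pvReFull]
  | cons c rest =>
    have hne : (c :: rest) ≠ ([] : List Char) := by simp
    have hgl : (c :: rest).getLast? = some ((c :: rest).getLast hne) :=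
      List.getLast?_eq_some_getLast hne
    simp only [PySem.List.pyGet?_zero_cons, PySem.List.pyGet?_neg_one, hgl]
    by_cases h128 : PySem.List.len (c :: rest) > 128
    · have hlen : 128 ≤ rest.length := by
        simp only [PySem.List.len_eq, List.length_cons] at h128; omega
      simp [hlen]
    · have hlen : ¬ 128 ≤ rest.length := by
        simp only [PySem.List.len_eq, List.length_cons] at h128; omega
      by_cases hdot : (c :: rest) = ['.'] ∨ (c :: rest) = ['.', '.']
      · rcases hdot with h | h <;>
        · injection h with h1 h2
          subst h1; subst h2
          simp [pvReFull, pvReGrp, pv_dot_not_alnum]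
      · have h1 : (c :: rest) ≠ ['.'] := fun h => hdot (Or.inl h)
        have h2 : (c :: rest) ≠ ['.', '.'] := fun h => hdot (Or.inr h)
        simp only [h1, h2, hlen, reduceCtorEq, decide_false, Bool.or_self, if_false]
        rw [pvReFull_char c rest]
        cases hc : pvAlnum c with
        | false => simp [hc]
        | true =>
          cases hl : pvAlnum ((c :: rest).getLast hne) with
          | false => simp [hc, hl]
          | true => simp [hc, hl, List.all_cons]
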